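-- pv_equiv track=rewrite | github.com/jaeyoung0509/algorithm_by_python | 08_test/02implement/t07.py | solution
-- ===== SOURCE A (Python) =====
-- def solution(data):
--     sum0 , sum1 =  0 , 0
--     for i in range(len(data)//2):
--         sum0 += i
--     for i in range(len(data)//2 , len(data)):
--         sum1 += i
--     if (sum0 == sum1):
--         return 'LUCKY'
--     else:
--         return 'READY'
-- ===== SOURCE B (Python) =====
-- def solution(data):
--     n = len(data)
--     h = n // 2
--     s0 = h * (h - 1) // 2
--     s1 = n * (n - 1) // 2 - s0
--     return 'LUCKY' if s0 == s1 else 'READY'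
-- ===== Notes on version B (the rewrite author's own statement) =====
-- stated objective: faster
-- what changed: Replaced the two index-summing loops by Gauss closed-form arithmetic-series formulas (sum of range(0,h) and of range(h,n)), so B runs in O(1).
import Mathlib
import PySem

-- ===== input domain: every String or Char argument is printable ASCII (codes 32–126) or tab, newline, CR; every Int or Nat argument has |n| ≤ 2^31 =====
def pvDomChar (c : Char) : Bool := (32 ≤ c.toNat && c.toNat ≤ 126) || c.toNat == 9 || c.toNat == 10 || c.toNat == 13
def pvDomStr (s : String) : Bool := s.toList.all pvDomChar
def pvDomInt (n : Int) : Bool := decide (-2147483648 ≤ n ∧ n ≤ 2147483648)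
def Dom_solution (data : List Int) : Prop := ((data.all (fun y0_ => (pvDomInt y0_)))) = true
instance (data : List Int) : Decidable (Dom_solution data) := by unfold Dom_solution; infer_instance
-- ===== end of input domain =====

-- B replaces A's two index-summing loops by Gauss closed-form formulas (O(1) instead of O(n)).

-- ===== PORT A =====
def solution (data : List Int) : String :=
  let sum0 : Int := (PySem.List.pyRange 0 (PySem.Int.floordiv (PySem.List.len data) 2) 1).foldl
    (fun s i => s + i) 0
  let sum1 : Int := (PySem.List.pyRange (PySem.Int.floordiv (PySem.List.len data) 2) (PySem.List.len data) 1).foldl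
    (fun s i => s + i) 0
  if sum0 == sum1 then "LUCKY" else "READY"

-- ===== PORT B =====
def solution_alt (data : List Int) : String :=
  let n : Int := PySem.List.len data
  let h : Int := PySem.Int.floordiv n 2
  let s0 : Int := PySem.Int.floordiv (h * (h - 1)) 2
  let s1 : Int := PySem.Int.floordiv (n * (n - 1)) 2 - s0
  if s0 == s1 then "LUCKY" else "READY"

-- ===== PRECONDITION & SPEC =====
def Spec_solution (data : List Int) (out : String) : Prop := out = solution_alt data
instance (data : List Int) (out : String) : Decidable (Spec_solution data out) := by unfold Spec_solution; infer_instance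

-- ===== CLAIM (what is proved, stated in full; the proofs are below) =====
def Claim_equal_solution : Prop := ∀ (data : List Int), Dom_solution data → Spec_solution data (solution data)

-- ===== LEMMAS AND PROOFS =====

-- doubled Gauss sum over a Python range, accumulator-general
theorem pv_two_mul_foldl_sum (m : Nat) : ∀ (a s : Int),
    2 * ((PySem.List.pyRange a (a + m) 1).foldl (fun s i => s + i) s)
      = 2 * s + 2 * m * a + m * (m - 1) := by
  induction m with
  | zero => intro a s; simp
  | succ k ih =>
    intro a s
    have hsplit : PySem.List.pyRange a (a + (k.succ : Nat)) 1
        = PySem.List.pyRange a (a + k) 1 ++ [a + k] := by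
      have : (a + (k.succ : Nat)) = (a + k) + 1 := by push_cast; ring
      rw [this, PySem.List.pyRange_one_succ_right (by omega : a ≤ a + k)]
    rw [hsplit, List.foldl_append]
    simp only [List.foldl_cons, List.foldl_nil]
    have := ih a s
    push_cast at this ⊢
    linarith

theorem pv_two_mul_sum (a b s : Int) (hab : a ≤ b) :
    2 * ((PySem.List.pyRange a b 1).foldl (fun s i => s + i) s)
      = 2 * s + (b - a) * (a + b - 1) := by
  have hm : b = a + ((b - a).toNat : Int) := by omega
  have := pv_two_mul_foldl_sum (b - a).toNat a s
  rw [← hm] at this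
  rw [this]
  have h2 : ((b - a).toNat : Int) = b - a := by omega
  rw [h2]; ring

theorem pv_two_mul_floordiv_even (x : Int) (h : Even x) :
    2 * PySem.Int.floordiv x 2 = x := by
  obtain ⟨k, hk⟩ := h
  have hfd : PySem.Int.floordiv x 2 = k := by
    rw [PySem.Int.floordiv_eq_iff_of_pos (by norm_num)]
    omega
  omega

-- ===== VERDICT (by name: the statement is the Claim_ definition above) =====
theorem solution_spec : Claim_equal_solution := by
  intro data _
  unfold Spec_solution solution solution_alt
  simp only [PySem.List.len_eq, beq_iff_eq]
  set n : Int := (data.length : Int) with hn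
  have hn0 : 0 ≤ n := by positivity
  set h : Int := PySem.Int.floordiv n 2 with hh
  have hhb : 0 ≤ h ∧ h ≤ n := by
    constructor <;>
    · have := PySem.Int.floordiv_eq_iff_of_pos (a := n) (b := 2) (q := h)
        (by norm_num) |>.mp rfl
      omega
  have hs0 := pv_two_mul_sum 0 h 0 hhb.1
  have hs1 := pv_two_mul_sum h n 0 hhb.2
  have hf0 := pv_two_mul_floordiv_even _ (Int.even_mul_pred_self h)
  have hf1 := pv_two_mul_floordiv_even _ (Int.even_mul_pred_self n)
  have hiff :
      ((PySem.List.pyRange 0 h 1).foldl (fun s i => s + i) 0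
        = (PySem.List.pyRange h n 1).foldl (fun s i => s + i) 0)
      ↔ (PySem.Int.floordiv (h * (h - 1)) 2
        = PySem.Int.floordiv (n * (n - 1)) 2 - PySem.Int.floordiv (h * (h - 1)) 2) := by
    constructor <;> intro hc <;> nlinarith [hc]
  rw [if_congr hiff rfl rfl]
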